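-- pv_equiv track=rewrite | github.com/Fill244/wb_report | reports/services/report_processor_multi.py | _extract_partner
-- ===== SOURCE A (Python) =====
-- def _extract_partner(value) -> str | None:
--     if value is None:
--         return None
--     s = str(value)
--     if not s:
--         return None
--     for ch in reversed(s):
--         o = ord(ch)
--         if 65 <= o <= 68:
--             return chr(o | 32)
--         if 97 <= o <= 100:
--             return ch
--     return None
-- ===== SOURCE B (Python) =====
-- def _extract_partner(value):
--     if value is None:
--         return None
--     s = str(value)
--     if not s:
--         return None
--     matches = [ch for ch in s if ch in 'ABCDabcd']
--     return matches[-1].lower() if matches else None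
-- ===== Notes on version B (the rewrite author's own statement) =====
-- stated objective: idiomatic
-- what changed: Replaces the reverse short-circuit scan with per-character ord-range branches by a single forward collection of all [A-Da-d] characters followed by taking the last match and calling .lower().
import Mathlib
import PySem

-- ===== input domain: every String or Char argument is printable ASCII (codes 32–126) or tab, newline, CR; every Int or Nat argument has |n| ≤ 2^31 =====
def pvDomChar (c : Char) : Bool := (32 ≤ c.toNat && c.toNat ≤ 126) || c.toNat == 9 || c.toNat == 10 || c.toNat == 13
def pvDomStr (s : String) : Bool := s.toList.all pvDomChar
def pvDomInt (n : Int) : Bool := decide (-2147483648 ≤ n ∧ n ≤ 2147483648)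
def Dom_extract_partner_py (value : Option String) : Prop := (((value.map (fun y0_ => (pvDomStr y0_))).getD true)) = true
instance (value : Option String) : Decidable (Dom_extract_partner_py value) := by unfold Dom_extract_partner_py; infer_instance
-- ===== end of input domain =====

-- B forward-collects all characters in 'ABCDabcd' and lowercases the last match, instead of A's reverse scan with ord-range branches; same return value, proved equal.

-- ===== PORT A =====
-- the 'for ch in reversed(s)' loop, A's branch order and chr(o | 32) construction kept
def pvScanA : List Char → Option String
  | [] => none
  | ch :: rest =>
    let o := ch.toNat
    if 65 ≤ o ∧ o ≤ 68 then some (String.ofList [Char.ofNat (o ||| 32)])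
    else if 97 ≤ o ∧ o ≤ 100 then some (String.ofList [ch])
    else pvScanA rest

def extract_partner_py (value : Option String) : Option String :=
  match value with
  | none => none
  | some s => if s.toList.isEmpty then none else pvScanA s.toList.reverse

-- ===== PORT B =====
def extract_partner_py_alt (value : Option String) : Option String :=
  match value with
  | none => none
  | some s =>
    if s.toList.isEmpty then none
    else
      let ms := s.toList.filter (fun ch => "ABCDabcd".toList.contains ch)
      match ms.getLast? with
      | none => none
      | some c => some (PySem.Str.lower (String.ofList [c]))

-- ===== PRECONDITION & SPEC =====
def Spec_extract_partner_py (value : Option String) (out : Option String) : Prop := out = extract_partner_py_alt value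
instance (value : Option String) (out : Option String) : Decidable (Spec_extract_partner_py value out) := by unfold Spec_extract_partner_py; infer_instance

-- ===== CLAIM (what is proved, stated in full; the proofs are below) =====
def Claim_equal_extract_partner_py : Prop := ∀ (value : Option String), Dom_extract_partner_py value → Spec_extract_partner_py value (extract_partner_py value)

-- ===== LEMMAS AND PROOFS =====

-- A's reverse scan returns the FIRST match of the traversed list, lowercased
lemma pvScanA_eq_head_filter (l : List Char) :
    pvScanA l = ((l.filter (fun ch => "ABCDabcd".toList.contains ch)).head?).map
      (fun c => PySem.Str.lower (String.ofList [c])) := by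
  have habcd : "ABCDabcd".toList = ['A','B','C','D','a','b','c','d'] := rfl
  induction l with
  | nil => rfl
  | cons ch rest ih =>
    simp only [habcd] at ih ⊢
    by_cases h1 : 65 ≤ ch.toNat ∧ ch.toNat ≤ 68
    · obtain ⟨ha, hb⟩ := h1
      have hc := Char.ofNat_toNat ch
      interval_cases h : ch.toNat <;>
        (subst hc;
         rw [List.filter_cons, if_pos (by decide)];
         simp only [List.head?_cons, Option.map_some];
         rfl)
    · by_cases h2 : 97 ≤ ch.toNat ∧ ch.toNat ≤ 100
      · obtain ⟨ha, hb⟩ := h2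
        have hc := Char.ofNat_toNat ch
        interval_cases h : ch.toNat <;>
          (subst hc;
           rw [List.filter_cons, if_pos (by decide)];
           simp only [List.head?_cons, Option.map_some];
           rfl)
      · have hp : (['A','B','C','D','a','b','c','d'].contains ch) = false := by
          simp only [List.contains_eq_mem, decide_eq_false_iff_not]
          intro hmem
          fin_cases hmem <;> simp_all
        have hstep : pvScanA (ch :: rest) = pvScanA rest := by simp [pvScanA, h1, h2]
        rw [hstep, ih, List.filter_cons, if_neg (by simpa using hp)]

-- scanning the reversed string = the LAST match of the string, lowercased
lemma pvScanA_reverse (l : List Char) :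
    pvScanA l.reverse = ((l.filter (fun ch => "ABCDabcd".toList.contains ch)).getLast?).map
      (fun c => PySem.Str.lower (String.ofList [c])) := by
  rw [pvScanA_eq_head_filter, List.filter_reverse, List.head?_reverse]

-- ===== VERDICT (by name: the statement is the Claim_ definition above) =====
theorem extract_partner_py_spec : Claim_equal_extract_partner_py := by
  intro value _
  unfold Spec_extract_partner_py extract_partner_py extract_partner_py_alt
  match value with
  | none => rfl
  | some s =>
    by_cases he : s.toList.isEmpty
    · simp [he]
    · simp only [he, Bool.false_eq_true, if_false]
      rw [pvScanA_reverse]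
      cases (s.toList.filter (fun ch => "ABCDabcd".toList.contains ch)).getLast? <;> rfl
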